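-- pv_equiv track=rewrite | github.com/xchgeaxeax/Software-Fundamentals | test1/05.py | get_first_mid_last
-- ===== SOURCE A (Python) =====
-- def get_first_mid_last(words):
--     result = []
--     for word in words:
--         new_word = ''
--         if len(word) >= 3:
--             new_word += word[0]
--             new_word += word[len(word) // 2]
--             new_word += word[-1]
--             if new_word.lower() not in result:
--                 result.append(new_word.lower())
--     return result
-- ===== SOURCE B (Python) =====
-- def get_first_mid_last(words):
--     # Build all candidate triples, dedupe with an (unordered) set, then
--     # reconstruct first-occurrence order by sorting on each triple's first index.
--     triples = [(w[0] + w[len(w) // 2] + w[-1]).lower() for w in words if len(w) >= 3]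
--     return sorted(set(triples), key=triples.index)
-- ===== Notes on version B (the rewrite author's own statement) =====
-- stated objective: alternative
-- what changed: B generates all triples, dedupes with a hash set, and recovers first-occurrence order by sorting the set by each triple's first index, instead of A's single pass with a membership scan on the growing result list.
import Mathlib
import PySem

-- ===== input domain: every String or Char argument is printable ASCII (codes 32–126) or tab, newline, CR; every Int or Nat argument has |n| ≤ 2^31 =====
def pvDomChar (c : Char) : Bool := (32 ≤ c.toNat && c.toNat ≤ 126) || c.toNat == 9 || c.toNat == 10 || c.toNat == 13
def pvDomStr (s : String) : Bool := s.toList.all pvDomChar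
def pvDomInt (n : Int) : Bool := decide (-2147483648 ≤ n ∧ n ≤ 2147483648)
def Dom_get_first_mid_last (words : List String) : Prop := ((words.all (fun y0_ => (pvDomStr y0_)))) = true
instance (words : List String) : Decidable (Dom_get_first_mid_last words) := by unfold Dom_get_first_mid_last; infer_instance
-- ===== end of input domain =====

-- B builds all triples, dedupes with a hash set, and recovers first-occurrence order by a
-- stable sort on each triple's first index; A interleaves a membership scan in one pass.
-- ===== PORT A =====
def get_first_mid_last (words : List String) : List String :=
  words.foldl (fun result word =>
    if 3 ≤ PySem.Str.len word then
      -- new_word = '' ; += word[0] ; += word[len(word)//2] ; += word[-1]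
      let new_word : String := String.ofList (([] : List Char)
        ++ [PySem.List.pyGetD word.toList 0 ' ']
        ++ [PySem.List.pyGetD word.toList (PySem.Int.floordiv (PySem.Str.len word) 2) ' ']
        ++ [PySem.List.pyGetD word.toList (-1) ' '])
      if PySem.Str.lower new_word ∈ result then result
      else result ++ [PySem.Str.lower new_word]
    else result) []

-- ===== PORT B =====
def pvTripleB (w : String) : String :=
  PySem.Str.lower (String.ofList ([PySem.List.pyGetD w.toList 0 ' ',
    PySem.List.pyGetD w.toList (PySem.Int.floordiv (PySem.Str.len w) 2) ' ',
    PySem.List.pyGetD w.toList (-1) ' ']))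

-- sorted(set(triples), key=triples.index): the key is injective on the set's elements, so
-- the result does not depend on the set's iteration order (exact per the PySem.Set rules).
-- triples.index(t) never raises here (every set element occurs in triples), hence the total
-- '(index? …).getD 0' form; the index is a nonnegative position, so Nat is exact.
def get_first_mid_last_alt (words : List String) : List String :=
  let triples := (words.filter (fun w => 3 ≤ PySem.Str.len w)).map pvTripleB
  PySem.List.sorted (PySem.Set.ofList triples)
    (fun t => (PySem.List.index? triples t).getD 0) false

-- ===== PRECONDITION & SPEC =====
def Spec_get_first_mid_last (words : List String) (out : List String) : Prop := out = get_first_mid_last_alt words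
instance (words : List String) (out : List String) : Decidable (Spec_get_first_mid_last words out) := by unfold Spec_get_first_mid_last; infer_instance

-- ===== CLAIM (what is proved, stated in full; the proofs are below) =====
def Claim_equal_get_first_mid_last : Prop := ∀ (words : List String), Dom_get_first_mid_last words → Spec_get_first_mid_last words (get_first_mid_last words)

-- ===== LEMMAS AND PROOFS =====
-- A's loop is set-update of the accumulator by the triples of the kept words.
lemma gfml_general (words : List String) (acc : List String) :
    words.foldl (fun result word =>
      if 3 ≤ PySem.Str.len word then
        let new_word : String := String.ofList (([] : List Char)
          ++ [PySem.List.pyGetD word.toList 0 ' ']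
          ++ [PySem.List.pyGetD word.toList (PySem.Int.floordiv (PySem.Str.len word) 2) ' ']
          ++ [PySem.List.pyGetD word.toList (-1) ' '])
        if PySem.Str.lower new_word ∈ result then result
        else result ++ [PySem.Str.lower new_word]
      else result) acc
    = PySem.Set.update acc ((words.filter (fun w => 3 ≤ PySem.Str.len w)).map pvTripleB) := by
  induction words generalizing acc with
  | nil => simp
  | cons w ws ih =>
    by_cases h : 3 ≤ PySem.Str.len w
    · have hadd : (if pvTripleB w ∈ acc then acc else acc ++ [pvTripleB w])
          = PySem.Set.add acc (pvTripleB w) := by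
        simp [PySem.Set.add]
      simp only [List.foldl_cons, List.filter_cons, h, if_pos, decide_true,
        List.map_cons, PySem.Set.update_cons]
      rw [← hadd]
      exact ih _
    · simp only [List.foldl_cons, List.filter_cons, h, decide_false]
      exact ih acc

-- list.index of an element known to be present, cons step.
lemma key_cons_of_mem_ne {α : Type} [BEq α] [LawfulBEq α] {x b : α} {xs : List α}
    (hm : b ∈ xs) (hne : x ≠ b) :
    (PySem.List.index? (x :: xs) b).getD 0 = (PySem.List.index? xs b).getD 0 + 1 := by
  rw [PySem.List.index?_cons_of_ne xs hne]
  obtain ⟨k, hk⟩ := Option.isSome_iff_exists.mp ((PySem.List.index?_isSome_iff xs b).mpr hm)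
  rw [PySem.List.index?_eq_idxOf?] at hk
  simp [hk]

-- set(xs), listed in insertion order, is strictly increasing in first-occurrence index.
lemma ofList_pairwise_index {α : Type} [BEq α] [LawfulBEq α] (xs : List α) :
    (PySem.Set.ofList xs).Pairwise
      (fun a b => ((PySem.List.index? xs a).getD 0) < ((PySem.List.index? xs b).getD 0)) := by
  induction xs with
  | nil => simp [PySem.Set.ofList]
  | cons x xs ih =>
    rw [PySem.Set.ofList_cons]
    constructor
    · intro b hb
      have hb' : b ∈ PySem.Set.ofList xs ∧ ¬(b == x) = true := by
        simpa [PySem.Set.discard, List.mem_filter] using hb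
      have hbm : b ∈ xs := (PySem.Set.mem_ofList _ _).mp hb'.1
      have hne : x ≠ b := fun h => hb'.2 (by simp [h.symm])
      rw [PySem.List.index?_cons_self, key_cons_of_mem_ne hbm hne]
      simp
    · have hdf : (PySem.Set.ofList xs).discard x
          = List.filter (fun y => !y == x) (PySem.Set.ofList xs) := rfl
      rw [hdf]
      refine List.Pairwise.imp_of_mem ?_ (List.Pairwise.filter _ ih)
      intro a b ha hb hab
      have hma : a ∈ xs := (PySem.Set.mem_ofList _ _).mp (List.mem_of_mem_filter ha)
      have hmb : b ∈ xs := (PySem.Set.mem_ofList _ _).mp (List.mem_of_mem_filter hb)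
      have hna : x ≠ a := fun h => by
        have := (List.mem_filter.mp ha).2; simp [h.symm] at this
      have hnb : x ≠ b := fun h => by
        have := (List.mem_filter.mp hb).2; simp [h.symm] at this
      rw [key_cons_of_mem_ne hma hna, key_cons_of_mem_ne hmb hnb]
      omega

-- B's sort by first index returns set(triples) in insertion (= first-occurrence) order.
lemma alt_eq_ofList (words : List String) :
    get_first_mid_last_alt words
      = PySem.Set.ofList ((words.filter (fun w => 3 ≤ PySem.Str.len w)).map pvTripleB) := by
  unfold get_first_mid_last_alt
  exact PySem.List.sorted_eq_of_perm_of_pairwise_lt _ _ _ (List.Perm.refl _)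
    (ofList_pairwise_index _)

-- ===== VERDICT (by name: the statement is the Claim_ definition above) =====
theorem get_first_mid_last_spec : Claim_equal_get_first_mid_last := by
  intro words _
  unfold Spec_get_first_mid_last get_first_mid_last
  rw [alt_eq_ofList, gfml_general, PySem.Set.update_nil_left]
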